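-- pv_equiv track=rewrite | github.com/qe40/selfbot | main.py | MainColor2
-- ===== SOURCE A (Python) =====
-- def MainColor2(text):
--     start_color = (168, 5, 5)
--     end_color = (255, 118, 118)
--
--     num_steps = 9
--
--     colors = []
--     for i in range(num_steps):
--         r = start_color[0] + (end_color[0] - start_color[0]) * i // (num_steps - 1)
--         g = start_color[1] + (end_color[1] - start_color[1]) * i // (num_steps - 1)
--         b = start_color[2] + (end_color[2] - start_color[2]) * i // (num_steps - 1)
--         colors.append((r, g, b))
--
--     colors += list(reversed(colors[:-1]))
--
--     def text_color(r, g, b):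
--         return f"\033[38;2;{r};{g};{b}m"
--
--     lines = text.split('\n')
--     num_colors = len(colors)
--
--     result = []
--     for i, line in enumerate(lines):
--         for j, char in enumerate(line):
--             color_index = (i + j) % num_colors
--             color = colors[color_index]
--             result.append(text_color(*color) + char + "\033[0m")
--
--         if i < len(lines) - 1:
--             result.append('\n')
--
--     return ''.join(result)
-- ===== SOURCE B (Python) =====
-- def MainColor2(text):
--     start_color = (168, 5, 5)
--     end_color = (255, 118, 118)
--     num_steps = 9
--
--     colors = [
--         (
--             start_color[0] + (end_color[0] - start_color[0]) * k // (num_steps - 1),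
--             start_color[1] + (end_color[1] - start_color[1]) * k // (num_steps - 1),
--             start_color[2] + (end_color[2] - start_color[2]) * k // (num_steps - 1),
--         )
--         for k in range(num_steps)
--     ]
--     colors += colors[-2::-1]
--     num_colors = len(colors)
--
--     out = []
--     i = 0  # line number
--     j = 0  # column within the current line
--     for ch in text:
--         if ch == '\n':
--             out.append('\n')
--             i += 1
--             j = 0
--         else:
--             r, g, b = colors[(i + j) % num_colors]
--             out.append(f"\033[38;2;{r};{g};{b}m{ch}\033[0m")
--             j += 1
--     return ''.join(out)
-- ===== Notes on version B (the rewrite author's own statement) =====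
-- stated objective: simpler
-- what changed: Replaced split-into-lines plus nested enumerate loops (with a not-last-line newline branch) by a single flat pass over the string that maintains line and column counters and emits each colored chunk or newline directly.
import Mathlib
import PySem

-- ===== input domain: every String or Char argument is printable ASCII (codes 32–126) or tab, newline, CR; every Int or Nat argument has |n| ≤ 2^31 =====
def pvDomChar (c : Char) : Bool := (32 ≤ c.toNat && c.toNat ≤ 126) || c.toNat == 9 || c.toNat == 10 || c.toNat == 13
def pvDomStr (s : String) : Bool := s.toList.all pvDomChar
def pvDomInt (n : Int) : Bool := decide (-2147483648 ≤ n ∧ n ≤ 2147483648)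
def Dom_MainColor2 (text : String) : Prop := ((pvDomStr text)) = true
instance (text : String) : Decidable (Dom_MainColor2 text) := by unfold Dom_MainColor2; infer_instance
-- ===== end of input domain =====

-- B replaces A's split-into-lines plus nested enumerate loops by ONE flat pass over the
-- string with line/column counters (simpler: no intermediate lines list, no last-line test).

-- ===== PORT A =====
-- the colors list A builds before looping (pure data, hoisted to a helper name)
def pvA_colorsBase : List (Int × Int × Int) :=
  (PySem.List.pyRange 0 9 1).foldl
    (fun acc i =>
      acc ++ [(168 + PySem.Int.floordiv ((255 - 168) * i) (9 - 1),
               5 + PySem.Int.floordiv ((118 - 5) * i) (9 - 1),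
               5 + PySem.Int.floordiv ((118 - 5) * i) (9 - 1))]) []

def pvA_colors : List (Int × Int × Int) :=
  pvA_colorsBase ++ (PySem.List.slice pvA_colorsBase none (some (-1))).reverse

-- Python's inner helper text_color(r, g, b)
def pvA_textColor (r g b : Int) : List Char :=
  ['\x1b', '[', '3', '8', ';', '2', ';'] ++ PySem.Int.toChars r ++ [';'] ++
    PySem.Int.toChars g ++ [';'] ++ PySem.Int.toChars b ++ ['m']

-- colors[color_index] never raises: color_index = (i+j) % 17 is always in range,
-- so .getD only supplies an unreachable default.
def MainColor2 (text : String) : String :=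
  let lines := PySem.Chars.splitOn text.toList ['\n']
  let numColors : Int := (pvA_colors.length : Int)
  let result : List (List Char) :=
    (PySem.List.enumerate lines 0).foldl
      (fun result p =>
        let result :=
          (PySem.List.enumerate p.2 0).foldl
            (fun r q =>
              let colorIndex := PySem.Int.mod (p.1 + q.1) numColors
              let color := (PySem.List.pyGet? pvA_colors colorIndex).getD (0, 0, 0)
              r ++ [pvA_textColor color.1 color.2.1 color.2.2 ++ [q.2] ++ ['\x1b', '[', '0', 'm']])
            result
        if p.1 < (lines.length : Int) - 1 then result ++ [['\n']] else result)
      []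
  String.ofList (PySem.Chars.join [] result)

-- ===== PORT B =====
def pvB_colorsBase : List (Int × Int × Int) :=
  (PySem.List.pyRange 0 9 1).map
    (fun k => (168 + PySem.Int.floordiv ((255 - 168) * k) (9 - 1),
               5 + PySem.Int.floordiv ((118 - 5) * k) (9 - 1),
               5 + PySem.Int.floordiv ((118 - 5) * k) (9 - 1)))

def pvB_colors : List (Int × Int × Int) :=
  pvB_colorsBase ++ (PySem.List.slice? pvB_colorsBase (some (-2)) none (-1)).getD []

-- one flat pass: state (i, j, out) = (line counter, column counter, accumulated pieces)
def MainColor2_alt (text : String) : String :=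
  let numColors : Int := (pvB_colors.length : Int)
  let fin :=
    text.toList.foldl
      (fun (st : Int × Int × List (List Char)) ch =>
        if ch = '\n' then (st.1 + 1, 0, st.2.2 ++ [['\n']])
        else
          let color := (PySem.List.pyGet? pvB_colors (PySem.Int.mod (st.1 + st.2.1) numColors)).getD (0, 0, 0)
          (st.1, st.2.1 + 1,
            st.2.2 ++ [['\x1b', '[', '3', '8', ';', '2', ';'] ++ PySem.Int.toChars color.1 ++ [';'] ++
              PySem.Int.toChars color.2.1 ++ [';'] ++ PySem.Int.toChars color.2.2 ++ ['m', ch] ++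
              ['\x1b', '[', '0', 'm']]))
      ((0 : Int), (0 : Int), ([] : List (List Char)))
  String.ofList (PySem.Chars.join [] fin.2.2)

-- ===== PRECONDITION & SPEC =====
def Spec_MainColor2 (text : String) (out : String) : Prop := out = MainColor2_alt text
instance (text : String) (out : String) : Decidable (Spec_MainColor2 text out) := by unfold Spec_MainColor2; infer_instance

-- ===== CLAIM (what is proved, stated in full; the proofs are below) =====
def Claim_equal_MainColor2 : Prop := ∀ (text : String), Dom_MainColor2 text → Spec_MainColor2 text (MainColor2 text)

-- ===== LEMMAS AND PROOFS =====

lemma pv_colors_eq : pvB_colors = pvA_colors := by decide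

-- the colored chunk both programs emit for column-sum k and character c
def pvChunk (k : Int) (c : Char) : List Char :=
  let color := (PySem.List.pyGet? pvA_colors (PySem.Int.mod k (pvA_colors.length : Int))).getD (0, 0, 0)
  pvA_textColor color.1 color.2.1 color.2.2 ++ [c] ++ ['\x1b', '[', '0', 'm']

-- common specification: render the tail of the text given line counter i, column counter j
def pvRender (i j : Int) : List Char → List Char
  | [] => []
  | c :: cs => if c = '\n' then '\n' :: pvRender (i + 1) 0 cs else pvChunk (i + j) c ++ pvRender i (j + 1) cs

-- rendering of one (partial) line starting at column j
def pvLine (i j : Int) : List Char → List Char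
  | [] => []
  | c :: cs => pvChunk (i + j) c ++ pvLine i (j + 1) cs

-- rendering of a list of lines, first line starting at column j, '\n' between lines
def pvArec (i j : Int) : List (List Char) → List Char
  | [] => []
  | [l] => pvLine i j l
  | l :: ls => pvLine i j l ++ '\n' :: pvArec (i + 1) 0 ls

-- structural model of cs.split('\n')
def pvSplit : List Char → List (List Char)
  | [] => [[]]
  | c :: cs => if c = '\n' then [] :: pvSplit cs else (c :: (pvSplit cs).headD []) :: (pvSplit cs).tail

def pvConsHead (p : List Char) : List (List Char) → List (List Char)
  | [] => [p]
  | x :: xs => (p ++ x) :: xs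

lemma pvSplit_ne_nil (cs : List Char) : pvSplit cs ≠ [] := by
  cases cs with
  | nil => simp [pvSplit]
  | cons c cs => simp only [pvSplit]; split <;> simp

lemma pv_go_spec : ∀ (fuel : Nat) (l cur : List Char) (acc : List (List Char)), l.length < fuel →
    PySem.Chars.splitOn.go ['\n'] fuel l cur acc = acc.reverse ++ pvConsHead cur.reverse (pvSplit l) := by
  intro fuel
  induction fuel with
  | zero => intro l cur acc h; omega
  | succ fuel ih =>
    intro l cur acc h
    cases l with
    | nil => simp [PySem.Chars.splitOn.go, pvSplit, pvConsHead]
    | cons c rest =>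
      rw [PySem.Chars.splitOn.go.eq_def]
      simp only [List.isPrefixOf, Bool.and_true]
      by_cases hc : c = '\n'
      · subst hc
        simp only [beq_self_eq_true, if_pos, List.length_cons, List.drop_succ_cons, List.drop_zero,
          List.length_nil]
        rw [ih rest [] (cur.reverse :: acc) (by simpa using Nat.lt_of_succ_lt_succ h)]
        simp [pvSplit]
        cases hsp : pvSplit rest with
        | nil => exact absurd hsp (pvSplit_ne_nil rest)
        | cons x xs => simp [pvConsHead]
      · have : ('\n' == c) = false := by exact beq_eq_false_iff_ne.mpr (fun e => hc e.symm)
        simp only [this, Bool.false_eq_true, if_neg, not_false_iff]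
        rw [ih rest (c :: cur) acc (by simpa using Nat.lt_of_succ_lt_succ h)]
        have hs : pvSplit (c :: rest) = (c :: (pvSplit rest).headD []) :: (pvSplit rest).tail := by
          simp [pvSplit, hc]
        rw [hs]
        cases hsp : pvSplit rest with
        | nil => exact absurd hsp (pvSplit_ne_nil rest)
        | cons x xs => simp [pvConsHead]
      
lemma pv_splitOn_eq (cs : List Char) : PySem.Chars.splitOn cs ['\n'] = pvSplit cs := by
  unfold PySem.Chars.splitOn
  rw [pv_go_spec (cs.length + 1) cs [] [] (Nat.lt_succ_self _)]
  cases hsp : pvSplit cs with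
  | nil => exact absurd hsp (pvSplit_ne_nil cs)
  | cons x xs => simp [pvConsHead]

lemma pv_join_nil (ps : List (List Char)) : PySem.Chars.join [] ps = ps.flatten := by
  induction ps with
  | nil => rfl
  | cons x xs ih =>
    cases xs with
    | nil => simp [PySem.Chars.join, List.intercalate]
    | cons y ys =>
      simp only [PySem.Chars.join, List.intercalate, List.intersperse] at *
      simp only [List.flatten_cons] at *
      simpa using ih

lemma pv_join_append (ps : List (List Char)) (x : List Char) :
    PySem.Chars.join [] (ps ++ [x]) = PySem.Chars.join [] ps ++ x := by
  simp [pv_join_nil]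

-- A's inner loop over one (suffix of a) line
lemma pv_inner_spec (l : List Char) : ∀ (i j : Int) (r : List (List Char)),
    PySem.Chars.join []
      ((PySem.List.enumerate l j).foldl
        (fun r q =>
          let colorIndex := PySem.Int.mod (i + q.1) (pvA_colors.length : Int)
          let color := (PySem.List.pyGet? pvA_colors colorIndex).getD (0, 0, 0)
          r ++ [pvA_textColor color.1 color.2.1 color.2.2 ++ [q.2] ++ ['\x1b', '[', '0', 'm']]) r)
    = PySem.Chars.join [] r ++ pvLine i j l := by
  induction l with
  | nil => intro i j r; simp [PySem.List.enumerate, pvLine]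
  | cons c cs ih =>
    intro i j r
    rw [PySem.List.enumerate_cons]
    simp only [List.foldl_cons]
    rw [ih i (j + 1) _]
    rw [pv_join_append]
    simp [pvLine, pvChunk]

-- A's outer loop over the enumerated lines
lemma pv_outer_spec (N : Int) : ∀ (ls : List (List Char)) (s : Int) (res : List (List Char)),
    s + (ls.length : Int) = N →
    PySem.Chars.join []
      ((PySem.List.enumerate ls s).foldl
        (fun result p =>
          let result :=
            (PySem.List.enumerate p.2 0).foldl
              (fun r q =>
                let colorIndex := PySem.Int.mod (p.1 + q.1) (pvA_colors.length : Int)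
                let color := (PySem.List.pyGet? pvA_colors colorIndex).getD (0, 0, 0)
                r ++ [pvA_textColor color.1 color.2.1 color.2.2 ++ [q.2] ++ ['\x1b', '[', '0', 'm']])
              result
          if p.1 < N - 1 then result ++ [['\n']] else result) res)
    = PySem.Chars.join [] res ++ pvArec s 0 ls := by
  intro ls
  induction ls with
  | nil => intro s res _; simp [PySem.List.enumerate, pvArec]
  | cons l ls ih =>
    intro s res hN
    rw [PySem.List.enumerate_cons]
    simp only [List.foldl_cons]
    cases ls with
    | nil =>
      have hcond : ¬ (s < N - 1) := by simp at hN; omega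
      simp only [hcond, if_neg, not_false_iff]
      rw [show PySem.List.enumerate ([] : List (List Char)) (s+1) = [] from rfl]
      simp only [List.foldl_nil]
      rw [pv_inner_spec l s 0 res]
      simp [pvArec]
    | cons l2 ls2 =>
      have hcond : s < N - 1 := by simp at hN; omega
      simp only [hcond, if_pos]
      rw [ih (s + 1) _ (by simp at hN ⊢; omega)]
      rw [pv_join_append, pv_inner_spec l s 0 res]
      simp [pvArec, List.append_assoc]

lemma pv_arec_cons (i j : Int) (c : Char) (h : List Char) (t : List (List Char)) :
    pvArec i j ((c :: h) :: t) = pvChunk (i + j) c ++ pvArec i (j + 1) (h :: t) := by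
  cases t with
  | nil => simp [pvArec, pvLine]
  | cons t0 ts => simp [pvArec, pvLine, List.append_assoc]

lemma pv_arec_render (cs : List Char) : ∀ (i j : Int), pvArec i j (pvSplit cs) = pvRender i j cs := by
  induction cs with
  | nil => intro i j; simp [pvSplit, pvArec, pvLine, pvRender]
  | cons c cs ih =>
    intro i j
    by_cases hc : c = '\n'
    · subst hc
      have hs : pvSplit ('\n' :: cs) = [] :: pvSplit cs := by simp [pvSplit]
      rw [hs]
      cases hsp : pvSplit cs with
      | nil => exact absurd hsp (pvSplit_ne_nil cs)
      | cons h t =>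
        have : pvArec i j ([] :: h :: t) = '\n' :: pvArec (i + 1) 0 (h :: t) := by
          simp [pvArec, pvLine]
        rw [this, ← hsp, ih (i + 1) 0]
        simp [pvRender]
    · have hs : pvSplit (c :: cs) = (c :: (pvSplit cs).headD []) :: (pvSplit cs).tail := by
        simp [pvSplit, hc]
      rw [hs]
      cases hsp : pvSplit cs with
      | nil => exact absurd hsp (pvSplit_ne_nil cs)
      | cons h t =>
        simp only [List.headD_cons, List.tail_cons]
        rw [pv_arec_cons, ← hsp, ih i (j + 1)]
        simp [pvRender, hc]

lemma pv_A_render (text : String) :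
    MainColor2 text = String.ofList (pvRender 0 0 text.toList) := by
  simp only [MainColor2]
  rw [pv_splitOn_eq]
  rw [pv_outer_spec ((pvSplit text.toList).length : Int) (pvSplit text.toList) 0 [] (by simp)]
  rw [← pv_arec_render text.toList 0 0]
  rfl

-- B's single pass: loop invariant
lemma pv_B_spec (cs : List Char) : ∀ (i j : Int) (acc : List (List Char)),
    PySem.Chars.join []
      (cs.foldl
        (fun (st : Int × Int × List (List Char)) ch =>
          if ch = '\n' then (st.1 + 1, 0, st.2.2 ++ [['\n']])
          else
            (st.1, st.2.1 + 1,
              st.2.2 ++ [['\x1b', '[', '3', '8', ';', '2', ';'] ++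
                PySem.Int.toChars ((PySem.List.pyGet? pvB_colors (PySem.Int.mod (st.1 + st.2.1) (pvB_colors.length : Int))).getD (0, 0, 0)).1 ++ [';'] ++
                PySem.Int.toChars ((PySem.List.pyGet? pvB_colors (PySem.Int.mod (st.1 + st.2.1) (pvB_colors.length : Int))).getD (0, 0, 0)).2.1 ++ [';'] ++
                PySem.Int.toChars ((PySem.List.pyGet? pvB_colors (PySem.Int.mod (st.1 + st.2.1) (pvB_colors.length : Int))).getD (0, 0, 0)).2.2 ++ ['m', ch] ++
                ['\x1b', '[', '0', 'm']])) (i, j, acc)).2.2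
    = PySem.Chars.join [] acc ++ pvRender i j cs := by
  induction cs with
  | nil => intro i j acc; simp [pvRender]
  | cons c cs ih =>
    intro i j acc
    simp only [List.foldl_cons]
    by_cases hc : c = '\n'
    · subst hc
      rw [if_pos rfl]
      rw [ih (i + 1) 0 _, pv_join_append]
      simp [pvRender]
    · simp only [hc, if_neg, not_false_iff]
      rw [ih i (j + 1) _, pv_join_append]
      have hchunk :
          ['\x1b', '[', '3', '8', ';', '2', ';'] ++
              PySem.Int.toChars ((PySem.List.pyGet? pvB_colors (PySem.Int.mod (i + j) (pvB_colors.length : Int))).getD (0, 0, 0)).1 ++ [';'] ++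
              PySem.Int.toChars ((PySem.List.pyGet? pvB_colors (PySem.Int.mod (i + j) (pvB_colors.length : Int))).getD (0, 0, 0)).2.1 ++ [';'] ++
              PySem.Int.toChars ((PySem.List.pyGet? pvB_colors (PySem.Int.mod (i + j) (pvB_colors.length : Int))).getD (0, 0, 0)).2.2 ++ ['m', c] ++
              ['\x1b', '[', '0', 'm']
            = pvChunk (i + j) c := by
        rw [pv_colors_eq]
        simp [pvChunk, pvA_textColor, List.append_assoc]
      rw [hchunk]
      simp [pvRender, hc, List.append_assoc]

lemma pv_B_render (text : String) :
    MainColor2_alt text = String.ofList (pvRender 0 0 text.toList) := by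
  simp only [MainColor2_alt]
  rw [pv_B_spec text.toList 0 0 []]
  rfl

-- ===== VERDICT (by name: the statement is the Claim_ definition above) =====
theorem MainColor2_spec : Claim_equal_MainColor2 := by
  intro text _
  unfold Spec_MainColor2
  rw [pv_A_render, pv_B_render]
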